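-- pv_equiv track=rewrite | github.com/wuzhao108/ai-init-project-generator | common/utils/string_utils.py | format_java_imports
-- ===== SOURCE A (Python) =====
-- from typing import List, Dict, Any
--
-- def format_java_imports(imports: List[str]) -> str:
--     """格式化Java导入语句
--
--     Args:
--         imports: 导入语句列表
--
--     Returns:
--         str: 格式化后的导入语句
--     """
--     if not imports:
--         return ""
--
--     # 去重并排序
--     unique_imports = sorted(set(imports))
--
--     # 分组：java.*, javax.*, org.*, com.*, 其他
--     java_imports = []
--     javax_imports = []
--     org_imports = []
--     com_imports = []
--     other_imports = []
--
--     for imp in unique_imports: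
--         if imp.startswith('java.'):
--             java_imports.append(imp)
--         elif imp.startswith('javax.'):
--             javax_imports.append(imp)
--         elif imp.startswith('org.'):
--             org_imports.append(imp)
--         elif imp.startswith('com.'):
--             com_imports.append(imp)
--         else:
--             other_imports.append(imp)
--
--     # 组合导入语句
--     result = []
--     for group in [java_imports, javax_imports, org_imports, com_imports, other_imports]:
--         if group:
--             result.extend([f"import {imp};" for imp in group])
--             result.append("")  # 添加空行分隔
--
--     # 移除最后的空行
--     if result and result[-1] == "":
--         result.pop()
--
--     return "\n".join(result)
-- ===== SOURCE B (Python) =====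
-- def format_java_imports(imports):
--     """Format Java import statements: dedup, group (java/javax/org/com/other), blank line between groups."""
--     def rank(imp):
--         if imp.startswith('java.'):
--             return 0
--         if imp.startswith('javax.'):
--             return 1
--         if imp.startswith('org.'):
--             return 2
--         if imp.startswith('com.'):
--             return 3
--         return 4
--
--     ordered = sorted(set(imports), key=lambda imp: str(rank(imp)) + imp)
--     lines = []
--     prev = None
--     for imp in ordered:
--         r = rank(imp)
--         if prev is not None and r != prev:
--             lines.append("")
--         lines.append(f"import {imp};")
--         prev = r
--     return "\n".join(lines)
-- ===== Notes on version B (the rewrite author's own statement) =====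
-- stated objective: alternative
-- what changed: A partitions the sorted unique imports into five group lists and concatenates them group by group, popping a trailing blank; B sorts the unique imports once under an injective rank-prefixed key and emits the lines in a single pass, inserting a blank line whenever the rank changes.
import Mathlib
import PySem

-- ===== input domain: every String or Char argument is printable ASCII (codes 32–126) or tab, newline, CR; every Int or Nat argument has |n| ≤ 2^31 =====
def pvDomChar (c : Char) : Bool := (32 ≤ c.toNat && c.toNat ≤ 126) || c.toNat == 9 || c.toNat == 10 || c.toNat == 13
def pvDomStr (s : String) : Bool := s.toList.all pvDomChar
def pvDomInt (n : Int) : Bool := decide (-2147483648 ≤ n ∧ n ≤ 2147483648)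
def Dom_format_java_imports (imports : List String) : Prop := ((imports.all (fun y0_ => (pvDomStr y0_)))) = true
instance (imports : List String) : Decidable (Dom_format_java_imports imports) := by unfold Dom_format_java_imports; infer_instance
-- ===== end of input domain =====

-- B replaces A's five-bucket partition pass and group-by-group assembly with one sort under an
-- injective rank-prefixed key followed by a single pass that inserts a blank line on rank changes
-- (objective: alternative decomposition, same asymptotic cost).

-- ===== PORT A =====
def fjiLineA (imp : String) : String := "import " ++ imp ++ ";"

-- the body of A's partition loop (state: java, javax, org, com, other)
def fjiStepA (s : List String × List String × List String × List String × List String)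
    (imp : String) : List String × List String × List String × List String × List String :=
  if PySem.Str.startswith imp "java." then (s.1 ++ [imp], s.2.1, s.2.2.1, s.2.2.2.1, s.2.2.2.2)
  else if PySem.Str.startswith imp "javax." then (s.1, s.2.1 ++ [imp], s.2.2.1, s.2.2.2.1, s.2.2.2.2)
  else if PySem.Str.startswith imp "org." then (s.1, s.2.1, s.2.2.1 ++ [imp], s.2.2.2.1, s.2.2.2.2)
  else if PySem.Str.startswith imp "com." then (s.1, s.2.1, s.2.2.1, s.2.2.2.1 ++ [imp], s.2.2.2.2)
  else (s.1, s.2.1, s.2.2.1, s.2.2.2.1, s.2.2.2.2 ++ [imp])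

def format_java_imports (imports : List String) : String :=
  if imports = [] then ""
  else
    let unique_imports := PySem.List.sorted (PySem.Set.ofList imports) (fun x => x) false
    let gs := unique_imports.foldl fjiStepA ([], [], [], [], [])
    let result := [gs.1, gs.2.1, gs.2.2.1, gs.2.2.2.1, gs.2.2.2.2].foldl
      (fun res g => if g ≠ [] then res ++ g.map fjiLineA ++ [""] else res) []
    -- result.pop() on a list known nonempty removes the last element — ported as dropLast (exact)
    let result := if result ≠ [] ∧ PySem.List.pyGetD result (-1) "" = "" then result.dropLast else result
    PySem.Str.join "\n" result

-- ===== PORT B =====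
def fjiRank (imp : String) : Int :=
  if PySem.Str.startswith imp "java." then 0
  else if PySem.Str.startswith imp "javax." then 1
  else if PySem.Str.startswith imp "org." then 2
  else if PySem.Str.startswith imp "com." then 3
  else 4

-- the sort key str(rank(imp)) + imp (injective, so the sort over the set is order-exact)
def fjiKey (imp : String) : String := PySem.Int.toStr (fjiRank imp) ++ imp

def fjiLineB (imp : String) : String := "import " ++ imp ++ ";"

-- the body of B's single output loop (state: lines, previous rank or none)
def fjiStep (s : List String × Option Int) (imp : String) : List String × Option Int :=
  let r := fjiRank imp
  let lines := match s.2 with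
    | none => s.1
    | some p => if r ≠ p then s.1 ++ [""] else s.1
  (lines ++ [fjiLineB imp], some r)

def format_java_imports_alt (imports : List String) : String :=
  let ordered := PySem.List.sorted (PySem.Set.ofList imports) fjiKey false
  let st := ordered.foldl fjiStep ([], none)
  PySem.Str.join "\n" st.1

-- ===== PRECONDITION & SPEC =====
def Spec_format_java_imports (imports : List String) (out : String) : Prop := out = format_java_imports_alt imports
instance (imports : List String) (out : String) : Decidable (Spec_format_java_imports imports out) := by unfold Spec_format_java_imports; infer_instance

-- ===== CLAIM (what is proved, stated in full; the proofs are below) =====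
def Claim_equal_format_java_imports : Prop := ∀ (imports : List String), Dom_format_java_imports imports → Spec_format_java_imports imports (format_java_imports imports)

-- ===== LEMMAS AND PROOFS =====

-- the rank-i bucket of a list
def fjiG (i : Int) (u : List String) : List String := u.filter (fun imp => decide (fjiRank imp = i))

lemma fjiG_cons (i : Int) (x : String) (u : List String) :
    fjiG i (x :: u) = if fjiRank x = i then x :: fjiG i u else fjiG i u := by
  by_cases h : fjiRank x = i <;> simp [fjiG, h]

lemma fjiRank_cases (imp : String) :
    fjiRank imp = 0 ∨ fjiRank imp = 1 ∨ fjiRank imp = 2 ∨ fjiRank imp = 3 ∨ fjiRank imp = 4 := by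
  unfold fjiRank; split_ifs <;> simp

-- A's partition loop produces exactly the five rank buckets
lemma fji_fold_partition (u : List String) (a b c d e : List String) :
    u.foldl fjiStepA (a, b, c, d, e) =
      (a ++ fjiG 0 u, b ++ fjiG 1 u, c ++ fjiG 2 u, d ++ fjiG 3 u, e ++ fjiG 4 u) := by
  induction u generalizing a b c d e with
  | nil => simp [fjiG]
  | cons x u ih =>
    have hs : fjiStepA (a, b, c, d, e) x =
        (if fjiRank x = 0 then a ++ [x] else a,
         if fjiRank x = 1 then b ++ [x] else b,
         if fjiRank x = 2 then c ++ [x] else c,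
         if fjiRank x = 3 then d ++ [x] else d,
         if fjiRank x = 4 then e ++ [x] else e) := by
      unfold fjiStepA fjiRank; split_ifs <;> simp_all
    rw [List.foldl_cons, hs, ih]
    simp only [fjiG_cons]
    rcases fjiRank_cases x with h | h | h | h | h <;> rw [h] <;> norm_num

lemma fji_perm_aux {A B u : List String} (x : String) (h : (A ++ B).Perm u)
    {L : List String} (hL : L = A ++ x :: B) : L.Perm (x :: u) :=
  hL ▸ (List.perm_middle.trans (h.cons x))

-- the five buckets together are a permutation of the list
lemma fji_perm (u : List String) :
    (fjiG 0 u ++ fjiG 1 u ++ fjiG 2 u ++ fjiG 3 u ++ fjiG 4 u).Perm u := by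
  induction u with
  | nil => simp [fjiG]
  | cons x u ih =>
    simp only [fjiG_cons 0, fjiG_cons 1, fjiG_cons 2, fjiG_cons 3, fjiG_cons 4]
    rcases fjiRank_cases x with h | h | h | h | h <;> rw [h] <;> split_ifs <;> try omega
    · exact fji_perm_aux (A := []) x (by simpa using ih) (by simp)
    · exact fji_perm_aux (A := fjiG 0 u) x (by simpa [List.append_assoc] using ih)
        (by simp [List.append_assoc])
    · exact fji_perm_aux (A := fjiG 0 u ++ fjiG 1 u) x (by simpa [List.append_assoc] using ih)
        (by simp [List.append_assoc])
    · exact fji_perm_aux (A := fjiG 0 u ++ fjiG 1 u ++ fjiG 2 u) x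
        (by simpa [List.append_assoc] using ih) (by simp [List.append_assoc])
    · exact fji_perm_aux (A := fjiG 0 u ++ fjiG 1 u ++ fjiG 2 u ++ fjiG 3 u) x
        (by simpa [List.append_assoc] using ih) (by simp [List.append_assoc])

lemma fjiKey_lt_of_same_rank {a b : String} (h : fjiRank a = fjiRank b) (hab : a < b) :
    fjiKey a < fjiKey b := by
  unfold fjiKey
  rw [h]
  rcases fjiRank_cases b with hr | hr | hr | hr | hr <;> rw [hr] <;>
    rw [String.lt_iff_toList_lt] at * <;>
    simp only [String.toList_append] <;>
    exact List.Lex.cons hab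

lemma fjiKey_lt_of_rank_lt {a b : String} (h : fjiRank a < fjiRank b) :
    fjiKey a < fjiKey b := by
  unfold fjiKey
  rcases fjiRank_cases a with ha | ha | ha | ha | ha <;>
    rcases fjiRank_cases b with hb | hb | hb | hb | hb <;>
    rw [ha, hb] at h ⊢ <;> first
    | omega
    | (rw [String.lt_iff_toList_lt]; simp only [String.toList_append];
       exact List.Lex.rel (by decide))

-- B's sort under the rank-prefixed key is the concatenation of the rank buckets of sorted(set(_))
lemma fji_sorted_key (imports : List String) :
    PySem.List.sorted (PySem.Set.ofList imports) fjiKey false =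
      fjiG 0 (PySem.List.sorted (PySem.Set.ofList imports) (fun x => x) false) ++
      fjiG 1 (PySem.List.sorted (PySem.Set.ofList imports) (fun x => x) false) ++
      fjiG 2 (PySem.List.sorted (PySem.Set.ofList imports) (fun x => x) false) ++
      fjiG 3 (PySem.List.sorted (PySem.Set.ofList imports) (fun x => x) false) ++
      fjiG 4 (PySem.List.sorted (PySem.Set.ofList imports) (fun x => x) false) := by
  set u := PySem.List.sorted (PySem.Set.ofList imports) (fun x => x) false with hu
  apply PySem.List.sorted_eq_of_perm_of_pairwise_lt
  · exact (fji_perm u).trans (PySem.List.sorted_perm _ _ _)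
  · have hul : u.Pairwise (· < ·) := PySem.List.sorted_ofList_pairwise_lt imports
    have hseg : ∀ i : Int, (fjiG i u).Pairwise (fun a b => fjiKey a < fjiKey b) := by
      intro i
      refine List.Pairwise.imp_of_mem ?_ (hul.filter (fun imp => decide (fjiRank imp = i)))
      intro a b hma hmb hab
      have ha := List.of_mem_filter hma
      have hb := List.of_mem_filter hmb
      simp only [decide_eq_true_eq] at ha hb
      exact fjiKey_lt_of_same_rank (ha.trans hb.symm) hab
    have hcr : ∀ (i j : Int), i < j → ∀ a ∈ fjiG i u, ∀ b ∈ fjiG j u, fjiKey a < fjiKey b := by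
      intro i j hij a hma b hmb
      have ha := List.of_mem_filter hma
      have hb := List.of_mem_filter hmb
      simp only [decide_eq_true_eq] at ha hb
      exact fjiKey_lt_of_rank_lt (by omega)
    refine List.pairwise_append.mpr ⟨List.pairwise_append.mpr ⟨List.pairwise_append.mpr
      ⟨List.pairwise_append.mpr ⟨hseg 0, hseg 1, fun a ha b hb => hcr 0 1 (by omega) a ha b hb⟩,
        hseg 2, ?_⟩, hseg 3, ?_⟩, hseg 4, ?_⟩ <;>
      intro a ha b hb <;> simp only [List.mem_append] at ha
    · rcases ha with ha | ha
      · exact hcr 0 2 (by omega) a ha b hb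
      · exact hcr 1 2 (by omega) a ha b hb
    · rcases ha with (ha | ha) | ha
      · exact hcr 0 3 (by omega) a ha b hb
      · exact hcr 1 3 (by omega) a ha b hb
      · exact hcr 2 3 (by omega) a ha b hb
    · rcases ha with ((ha | ha) | ha) | ha
      · exact hcr 0 4 (by omega) a ha b hb
      · exact hcr 1 4 (by omega) a ha b hb
      · exact hcr 2 4 (by omega) a ha b hb
      · exact hcr 3 4 (by omega) a ha b hb

-- removing the trailing blank from A's assembled lines = blank-prefixed continuation blocks
lemma fji_dropLast (ls : List (List String)) (l0 : List String) :
    ((l0 :: ls).flatMap (fun g => g.map fjiLineA ++ [""])).dropLast =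
      l0.map fjiLineA ++ ls.flatMap (fun g => "" :: g.map fjiLineA) := by
  induction ls generalizing l0 with
  | nil => simp
  | cons l1 tl ih =>
    have hne : ((l1 :: tl).flatMap (fun g => g.map fjiLineA ++ [""])) ≠ [] := by
      simp [List.flatMap_cons]
    calc ((l0 :: l1 :: tl).flatMap (fun g => g.map fjiLineA ++ [""])).dropLast
        = (l0.map fjiLineA ++ [""]) ++
            ((l1 :: tl).flatMap (fun g => g.map fjiLineA ++ [""])).dropLast := by
          rw [List.flatMap_cons, List.dropLast_append_of_ne_nil hne]
      _ = _ := by rw [ih l1]; simp [List.flatMap_cons]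

lemma fji_flat_ends (ls : List (List String)) (l0 : List String) :
    ∃ pre, (l0 :: ls).flatMap (fun g => g.map fjiLineA ++ [""]) = pre ++ [""] := by
  induction ls generalizing l0 with
  | nil => exact ⟨l0.map fjiLineA, by simp⟩
  | cons l1 tl ih =>
    obtain ⟨pre, hp⟩ := ih l1
    refine ⟨l0.map fjiLineA ++ [""] ++ pre, ?_⟩
    simp only [List.flatMap_cons] at hp ⊢
    rw [hp]
    simp [List.append_assoc]

-- B's loop over a run of equal-rank imports, previous rank already r: no separators
lemma fji_fold_same (g : List String) (r : Int) (h : ∀ x ∈ g, fjiRank x = r) (acc : List String) :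
    g.foldl fjiStep (acc, some r) = (acc ++ g.map fjiLineB, some r) := by
  induction g generalizing acc with
  | nil => simp
  | cons x g ih =>
    have hx : fjiRank x = r := h x (by simp)
    have hstep : fjiStep (acc, some r) x = (acc ++ [fjiLineB x], some r) := by
      simp [fjiStep, hx]
    rw [List.foldl_cons, hstep, ih (fun y hy => h y (by simp [hy]))]
    simp [List.append_assoc]

-- B's loop over a chain of nonempty homogeneous blocks of strictly increasing rank,
-- after a block of strictly smaller rank: one separator before each block
lemma fji_fold_chain (hs : List (Int × List String)) (p : Int) (acc : List String)
    (hb : ∀ b ∈ hs, ∀ x ∈ b.2, fjiRank x = b.1)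
    (hne : ∀ b ∈ hs, b.2 ≠ [])
    (hp : ∀ b ∈ hs, p < b.1)
    (hpw : hs.Pairwise (fun a b => a.1 < b.1)) :
    ((hs.flatMap (fun b => b.2)).foldl fjiStep (acc, some p)).1 =
      acc ++ hs.flatMap (fun b => "" :: b.2.map fjiLineB) := by
  induction hs generalizing p acc with
  | nil => simp
  | cons b0 tl ih =>
    obtain ⟨r, g⟩ := b0
    obtain ⟨x, g', rfl⟩ := List.exists_cons_of_ne_nil (hne (r, g) (by simp))
    have hr : ∀ y ∈ x :: g', fjiRank y = r := hb (r, x :: g') (by simp)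
    have hxr : fjiRank x = r := hr x (by simp)
    have hpr : p < r := hp (r, x :: g') (by simp)
    simp only [List.flatMap_cons, List.foldl_append, List.foldl_cons]
    have hstep : fjiStep (acc, some p) x = (acc ++ [""] ++ [fjiLineB x], some r) := by
      simp [fjiStep, hxr, List.append_assoc]
      rw [if_neg (by omega : ¬ r = p)]
      simp
    rw [hstep, fji_fold_same g' r (fun y hy => hr y (by simp [hy])) _]
    rw [ih r _ (fun b hbm => hb b (by simp [hbm])) (fun b hbm => hne b (by simp [hbm]))
      (fun b hbm => (List.pairwise_cons.mp hpw).1 b hbm) (List.pairwise_cons.mp hpw).2]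
    simp [List.append_assoc]

-- the first block gets no separator (previous rank is none)
lemma fji_fold_start (r : Int) (g : List String) (tl : List (Int × List String))
    (hg : g ≠ []) (hgr : ∀ x ∈ g, fjiRank x = r)
    (hb : ∀ b ∈ tl, ∀ x ∈ b.2, fjiRank x = b.1)
    (hne : ∀ b ∈ tl, b.2 ≠ [])
    (hp : ∀ b ∈ tl, r < b.1)
    (hpw : tl.Pairwise (fun a b => a.1 < b.1)) :
    (((((r, g) : Int × List String) :: tl).flatMap (fun b => b.2)).foldl fjiStep ([], none)).1 =
      g.map fjiLineB ++ tl.flatMap (fun b => "" :: b.2.map fjiLineB) := by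
  obtain ⟨x, g', rfl⟩ := List.exists_cons_of_ne_nil hg
  have hxr : fjiRank x = r := hgr x (by simp)
  simp only [List.flatMap_cons, List.foldl_append, List.foldl_cons]
  have hstep : fjiStep ([], none) x = ([fjiLineB x], some r) := by simp [fjiStep, hxr]
  rw [hstep, fji_fold_same g' r (fun y hy => hgr y (by simp [hy])) ([fjiLineB x])]
  rw [fji_fold_chain tl r _ hb hne hp hpw]
  simp

-- dropping the empty buckets does not change the flattened sequence
lemma fji_flatMap_filter (l : List (Int × List String)) :
    ((l.filter (fun b => decide (b.2 ≠ []))).flatMap (fun b => b.2)) = l.flatMap (fun b => b.2) := by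
  induction l with
  | nil => rfl
  | cons b tl ih =>
    by_cases hb : b.2 = [] <;> simpa [List.filter_cons, hb] using ih

-- buckets tagged with their ranks, empty buckets removed
def fjiBlocks (u : List String) : List (Int × List String) :=
  ([(0, fjiG 0 u), (1, fjiG 1 u), (2, fjiG 2 u), (3, fjiG 3 u), (4, fjiG 4 u)]).filter
    (fun b => decide (b.2 ≠ []))

lemma fjiBlocks_flat (u : List String) :
    fjiG 0 u ++ fjiG 1 u ++ fjiG 2 u ++ fjiG 3 u ++ fjiG 4 u =
      (fjiBlocks u).flatMap (fun b => b.2) := by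
  rw [fjiBlocks, fji_flatMap_filter]
  simp [List.append_assoc]

lemma fjiBlocks_snd (u : List String) :
    (fjiBlocks u).map Prod.snd =
      ([fjiG 0 u, fjiG 1 u, fjiG 2 u, fjiG 3 u, fjiG 4 u]).filter (fun g => decide (g ≠ [])) := by
  simp only [fjiBlocks, List.filter_cons]
  split_ifs <;> simp_all

lemma fjiBlocks_rank (u : List String) : ∀ b ∈ fjiBlocks u, ∀ x ∈ b.2, fjiRank x = b.1 := by
  intro b hbm x hx
  have hbig := List.mem_of_mem_filter hbm
  simp only [List.mem_cons, List.not_mem_nil, or_false] at hbig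
  rcases hbig with rfl | rfl | rfl | rfl | rfl <;>
    simpa using List.of_mem_filter hx

lemma fjiBlocks_ne (u : List String) : ∀ b ∈ fjiBlocks u, b.2 ≠ [] := by
  intro b hbm
  simpa using List.of_mem_filter hbm

lemma fjiBlocks_pw (u : List String) : (fjiBlocks u).Pairwise (fun a b => a.1 < b.1) := by
  refine List.Pairwise.filter _ ?_
  norm_num [List.pairwise_cons]

theorem format_java_imports_spec : Claim_equal_format_java_imports := by
  unfold Claim_equal_format_java_imports
  intro imports _
  unfold Spec_format_java_imports
  by_cases hemp : imports = []
  · subst hemp; rfl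
  · simp only [format_java_imports, format_java_imports_alt, if_neg hemp]
    set u := PySem.List.sorted (PySem.Set.ofList imports) (fun x => x) false with hu
    have hu_ne : u ≠ [] := by
      obtain ⟨x, xs, rfl⟩ := List.exists_cons_of_ne_nil hemp
      have hx : x ∈ u := by
        rw [hu, PySem.List.mem_sorted]
        exact (PySem.Set.mem_ofList _ _).mpr (by simp)
      exact List.ne_nil_of_mem hx
    have hhs_ne : fjiBlocks u ≠ [] := by
      intro h0
      have hflat := fjiBlocks_flat u
      rw [h0] at hflat
      simp only [List.flatMap_nil] at hflat
      have hperm := fji_perm u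
      rw [hflat] at hperm
      exact hu_ne hperm.symm.eq_nil
    obtain ⟨b0, htl, hhs⟩ := List.exists_cons_of_ne_nil hhs_ne
    obtain ⟨r0, g0⟩ := b0
    -- A side: partition, then assemble
    rw [fji_fold_partition u [] [] [] [] []]
    simp only [List.nil_append, List.append_assoc]
    rw [PySem.List.foldl_ite_eq_foldl_filter
      (p := fun g : List String => g ≠ [])
      (f := fun res g => res ++ (List.map fjiLineA g ++ [""]))]
    rw [PySem.List.foldl_append_eq_flatMap]
    rw [← fjiBlocks_snd u, hhs]
    simp only [List.map_cons, List.flatMap_cons]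
    -- the guard: the assembled list is nonempty and ends in ""
    obtain ⟨pre, hpre⟩ := fji_flat_ends ((htl.map Prod.snd)) g0
    simp only [List.flatMap_cons] at hpre
    rw [List.nil_append]
    have hguard : (List.map fjiLineA g0 ++ [""] ++
        List.flatMap (fun g => List.map fjiLineA g ++ [""]) (List.map Prod.snd htl)) ≠ [] ∧
        PySem.List.pyGetD (List.map fjiLineA g0 ++ [""] ++
          List.flatMap (fun g => List.map fjiLineA g ++ [""]) (List.map Prod.snd htl)) (-1) "" = "" := by
      refine ⟨?_, ?_⟩
      · rw [hpre]; simp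
      · rw [hpre, PySem.List.pyGetD_neg_one_append_singleton]
    rw [if_pos hguard]
    -- remove the trailing blank
    have hdl := fji_dropLast (htl.map Prod.snd) g0
    simp only [List.flatMap_cons] at hdl
    rw [hdl]
    -- B side
    rw [fji_sorted_key imports, ← hu, fjiBlocks_flat u, hhs]
    have hcons := List.pairwise_cons.mp (hhs ▸ fjiBlocks_pw u)
    rw [fji_fold_start r0 g0 htl
      (fjiBlocks_ne u _ (hhs ▸ List.mem_cons_self))
      (fjiBlocks_rank u _ (hhs ▸ List.mem_cons_self))
      (fun b hbm => fjiBlocks_rank u b (hhs ▸ List.mem_cons_of_mem _ hbm))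
      (fun b hbm => fjiBlocks_ne u b (hhs ▸ List.mem_cons_of_mem _ hbm))
      hcons.1 hcons.2]
    congr 1
    simp only [List.flatMap_map]
    rfl
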